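-- pv_equiv track=rewrite | github.com/l52w/programmers | 프로그래머스/unrated/181931. 등차수열의 특정한 항만 더하기/등차수열의 특정한 항만 더하기.py | solution
-- ===== SOURCE A (Python) =====
-- def solution(a, d, included):
--     answer = 0
--     true = True
--     false = False
--     b=[]
--     for i in range(len(included)) :
--         c = a + i*d
--         b.insert(i,c)
--     for i in range(len(included)) :
--         if included[i] == true :
--             answer += b[i]
--         else :
--             pass
--     return answer
-- ===== SOURCE B (Python) =====
-- def solution(a, d, included):
--     # one pass: count selected positions and sum their indices, then closed form
--     n = 0
--     s = 0
--     for i, inc in enumerate(included):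
--         if inc == True:
--             n += 1
--             s += i
--     return a * n + d * s
-- ===== Notes on version B (the rewrite author's own statement) =====
-- stated objective: simpler
-- what changed: B replaces A two passes (building the per-term list b with list.insert, then summing selected b[i]) with a single pass accumulating only the count n and index-sum s of included positions, returning the closed form a*n + d*s.
import Mathlib
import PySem

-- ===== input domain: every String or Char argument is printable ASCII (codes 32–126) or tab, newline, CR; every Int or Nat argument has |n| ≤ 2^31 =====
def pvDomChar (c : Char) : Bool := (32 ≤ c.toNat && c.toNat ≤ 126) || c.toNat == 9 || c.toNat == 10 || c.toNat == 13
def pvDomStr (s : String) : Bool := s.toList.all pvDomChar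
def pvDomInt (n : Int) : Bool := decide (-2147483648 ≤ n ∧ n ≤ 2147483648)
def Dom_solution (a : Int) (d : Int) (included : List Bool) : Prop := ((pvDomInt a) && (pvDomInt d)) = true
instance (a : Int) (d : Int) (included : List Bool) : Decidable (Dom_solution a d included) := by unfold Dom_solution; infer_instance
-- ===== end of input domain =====

-- B changes A's two index loops (build the per-term list b, then sum the selected b[i]) into one
-- pass keeping only the count and index-sum of included positions, returning a*n + d*s (simpler).

-- ===== PORT A =====
def solution (a : Int) (d : Int) (included : List Bool) : Int :=
  let b : List Int :=
    (PySem.List.pyRange 0 included.length 1).foldl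
      (fun b i => PySem.List.insert b i (a + i * d)) []
  (PySem.List.pyRange 0 included.length 1).foldl
    (fun answer i =>
      if PySem.List.pyGetD included i false == true then
        answer + PySem.List.pyGetD b i 0
      else answer) 0

-- ===== PORT B =====
def solution_alt (a : Int) (d : Int) (included : List Bool) : Int :=
  let p : Int × Int :=
    (PySem.List.enumerate included 0).foldl
      (fun (p : Int × Int) e => if e.2 == true then (p.1 + 1, p.2 + e.1) else p) (0, 0)
  a * p.1 + d * p.2

-- ===== PRECONDITION & SPEC =====
def Spec_solution (a : Int) (d : Int) (included : List Bool) (out : Int) : Prop := out = solution_alt a d included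
instance (a : Int) (d : Int) (included : List Bool) (out : Int) : Decidable (Spec_solution a d included out) := by unfold Spec_solution; infer_instance

-- ===== CLAIM (what is proved, stated in full; the proofs are below) =====
def Claim_equal_solution : Prop := ∀ (a : Int) (d : Int) (included : List Bool), Dom_solution a d included → Spec_solution a d included (solution a d included)

-- ===== LEMMAS AND PROOFS =====

-- A's first loop (insert at position i = current length) builds exactly the mapped range.
theorem pv_b_closed (a d : Int) (m : Nat) :
    (PySem.List.pyRange 0 m 1).foldl (fun b i => PySem.List.insert b i (a + i * d)) []
      = (PySem.List.pyRange 0 m 1).map (fun i => a + i * d) := by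
  induction m with
  | zero => simp [PySem.List.pyRange]
  | succ m ih =>
      have h : ((m + 1 : Nat) : Int) = (m : Int) + 1 := by push_cast; ring
      rw [h, PySem.List.pyRange_one_succ_right (by exact_mod_cast Nat.zero_le m),
        List.foldl_append, List.map_append, ih]
      have hlen : ((PySem.List.pyRange 0 m 1).map (fun i => a + i * d)).length = m := by
        simp [PySem.List.length_pyRange_one]
      simp only [List.foldl_cons, List.foldl_nil, List.map_cons, List.map_nil]
      rw [PySem.List.insert_natCast _ m _ (by omega)]
      rw [List.take_of_length_le (by omega), List.drop_eq_nil_of_le (by omega)]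

theorem pv_enumerate_append (l : List Bool) (x : Bool) (s : Int) :
    PySem.List.enumerate (l ++ [x]) s
      = PySem.List.enumerate l s ++ [((s + l.length : Int), x)] := by
  induction l generalizing s with
  | nil => simp [PySem.List.enumerate_cons, PySem.List.enumerate_nil]
  | cons y ys ih =>
      simp only [List.cons_append, PySem.List.enumerate_cons, ih, List.length_cons]
      have : s + 1 + (ys.length : Int) = s + ((ys.length : Nat) + 1 : Nat) := by push_cast; ring
      rw [this]

-- A's second loop with b replaced by its closed form.
theorem pv_A_closed (a d : Int) (l : List Bool) :
    solution a d l
      = (PySem.List.pyRange 0 (l.length : Int) 1).foldl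
          (fun answer i =>
            if PySem.List.pyGetD l i false == true then answer + (a + i * d) else answer) 0 := by
  unfold solution
  simp only [pv_b_closed]
  apply PySem.List.foldl_congr_mem
  intro acc i hi
  rw [PySem.List.mem_pyRange_one] at hi
  rw [PySem.List.pyGetD_map_pyRange_of_nonneg _ _ _ _ hi.1 hi.2]

-- A's snoc recurrence.
theorem pv_A_snoc (a d : Int) (l : List Bool) (x : Bool) :
    solution a d (l ++ [x])
      = solution a d l + (if x then a + (l.length : Int) * d else 0) := by
  rw [pv_A_closed, pv_A_closed]
  have hlen : ((l ++ [x]).length : Int) = (l.length : Int) + 1 := by push_cast; simp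
  rw [hlen, PySem.List.pyRange_one_succ_right (by exact_mod_cast Nat.zero_le l.length),
    List.foldl_append]
  have hcong :
      (PySem.List.pyRange 0 (l.length : Int) 1).foldl
        (fun answer i =>
          if PySem.List.pyGetD (l ++ [x]) i false == true then answer + (a + i * d) else answer) 0
      = (PySem.List.pyRange 0 (l.length : Int) 1).foldl
        (fun answer i =>
          if PySem.List.pyGetD l i false == true then answer + (a + i * d) else answer) 0 := by
    apply PySem.List.foldl_congr_mem
    intro acc i hi
    rw [PySem.List.mem_pyRange_one] at hi
    have h1 : PySem.List.pyGetD (l ++ [x]) i false = PySem.List.pyGetD l i false := by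
      rw [PySem.List.pyGetD_eq_getElem (l ++ [x]) false hi.1 (by simp; omega),
        PySem.List.pyGetD_eq_getElem l false hi.1 (by exact_mod_cast hi.2)]
      exact List.getElem_append_left (by omega)
    rw [h1]
  rw [hcong]
  simp only [List.foldl_cons, List.foldl_nil]
  have hx : PySem.List.pyGetD (l ++ [x]) (l.length : Int) false = x := by
    rw [PySem.List.pyGetD_eq_getElem (l ++ [x]) false (by omega) (by simp)]
    simp
  rw [hx]
  cases x <;> simp

-- B's snoc recurrence.
theorem pv_B_snoc (a d : Int) (l : List Bool) (x : Bool) :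
    solution_alt a d (l ++ [x])
      = solution_alt a d l + (if x then a + (l.length : Int) * d else 0) := by
  unfold solution_alt
  rw [pv_enumerate_append, List.foldl_append]
  simp only [List.foldl_cons, List.foldl_nil]
  cases x <;> simp <;> ring

theorem pv_eq (a d : Int) (l : List Bool) : solution a d l = solution_alt a d l := by
  induction l using List.reverseRecOn with
  | nil => simp [solution, solution_alt, PySem.List.pyRange, PySem.List.enumerate_nil]
  | append_singleton l x ih => rw [pv_A_snoc, pv_B_snoc, ih]

theorem solution_spec : Claim_equal_solution := by
  intro a d included _
  unfold Spec_solution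
  exact pv_eq a d included
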